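-- pv_equiv track=rewrite | github.com/HourGlss/aoc | y2016/day6/main_b.py | get_lowest_occurance_char_in_list
-- ===== SOURCE A (Python) =====
-- def get_lowest_occurance_char_in_list(list_data) -> str:
--     letters = dict()
--     for c in list_data:
--         if c not in letters.keys():
--             letters[c] = 0
--         letters[c] += 1
--     min_used = min(letters.values())
--     for k, v in letters.items():
--         if v == min_used:
--             return k
-- ===== SOURCE B (Python) =====
-- def get_lowest_occurance_char_in_list(list_data) -> str:
--     # No frequency dict: minimise over the distinct elements under the lexicographic
--     # key (occurrence count, first position).  The key is injective because first
--     # positions are distinct, so the set's iteration order cannot affect the result.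
--     return min(set(list_data), key=lambda c: (list_data.count(c), list_data.index(c)))
-- ===== Notes on version B (the rewrite author's own statement) =====
-- stated objective: alternative
-- what changed: B removes A's frequency dict and its two selection passes (min of values, then an items re-scan): it takes a single min over set(list_data) under the injective lexicographic key (list_data.count(c), list_data.index(c)), computing counts and tie-break positions by direct list scans instead of maintaining a counter.
import Mathlib
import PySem

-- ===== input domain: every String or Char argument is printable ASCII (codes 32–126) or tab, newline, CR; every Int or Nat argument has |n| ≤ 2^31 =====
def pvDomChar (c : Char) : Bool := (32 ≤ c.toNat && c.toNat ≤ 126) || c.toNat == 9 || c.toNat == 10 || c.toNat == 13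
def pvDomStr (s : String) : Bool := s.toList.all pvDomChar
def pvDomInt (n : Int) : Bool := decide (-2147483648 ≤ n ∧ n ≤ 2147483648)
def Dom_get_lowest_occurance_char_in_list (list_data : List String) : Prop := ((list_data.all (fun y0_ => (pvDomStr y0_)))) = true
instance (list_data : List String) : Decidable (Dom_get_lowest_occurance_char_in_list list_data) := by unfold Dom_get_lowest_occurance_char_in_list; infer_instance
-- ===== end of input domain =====

-- B drops A's frequency dict and its two selection passes entirely: it takes the
-- minimum over the distinct elements under the lexicographic key
-- (occurrence count, first position) computed by direct scans (objective: alternative).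

-- ===== PORT A =====
-- letters = dict(); for c: if c not in letters: letters[c] = 0; letters[c] += 1
-- min_used = min(letters.values()); first (k, v) in items with v == min_used.
def get_lowest_occurance_char_in_list (list_data : List String) : String :=
  let letters := list_data.foldl
    (fun d c =>
      let d := if d.contains c then d else d.insert c (0 : Int)
      d.insert c (d.getD c 0 + 1))
    PySem.Dict.empty
  let min_used := (PySem.List.min? letters.values (fun v => v)).getD 0  -- none ↔ empty input, excluded by Pre_
  match letters.items.find? (fun p => p.2 == min_used) with
  | some p => p.1
  | none => ""  -- unreachable: min_used occurs among the values

-- ===== PORT B =====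
-- min(set(list_data), key=lambda c: (list_data.count(c), list_data.index(c)))
-- list.index never raises here: the argument ranges over set(list_data), so it is
-- always present; index? returns some and the .getD 0 default is never used.
def get_lowest_occurance_char_in_list_alt (list_data : List String) : String :=
  (PySem.List.min2? (PySem.Set.ofList list_data)
      (fun c => (list_data.count c : Int))
      (fun c => ((PySem.List.index? list_data c).getD 0 : Int))).getD ""
  -- none ↔ empty input, excluded by Pre_

-- ===== PRECONDITION & SPEC =====
-- On the empty list both A and B raise ValueError (min of an empty sequence); excluded.
def Pre_get_lowest_occurance_char_in_list (list_data : List String) : Prop := list_data ≠ []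
instance (list_data : List String) : Decidable (Pre_get_lowest_occurance_char_in_list list_data) := by unfold Pre_get_lowest_occurance_char_in_list; infer_instance
def pvWitness_get_lowest_occurance_char_in_list : List String := ["a", "b", "a"]

def Spec_get_lowest_occurance_char_in_list (list_data : List String) (out : String) : Prop := out = get_lowest_occurance_char_in_list_alt list_data
instance (list_data : List String) (out : String) : Decidable (Spec_get_lowest_occurance_char_in_list list_data out) := by unfold Spec_get_lowest_occurance_char_in_list; infer_instance

-- ===== CLAIM (what is proved, stated in full; the proofs are below) =====
def Claim_equal_get_lowest_occurance_char_in_list : Prop := ∀ (list_data : List String), Dom_get_lowest_occurance_char_in_list list_data → Pre_get_lowest_occurance_char_in_list list_data → Spec_get_lowest_occurance_char_in_list list_data (get_lowest_occurance_char_in_list list_data)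

-- ===== LEMMAS AND PROOFS =====

-- A's loop body is exactly the 'insert (getD + 1)' counting step.
theorem pvStepA_eq (d : PySem.Dict String Int) (c : String) :
    (let d' := if d.contains c then d else d.insert c (0 : Int)
     d'.insert c (d'.getD c 0 + 1)) = d.insert c (d.getD c 0 + 1) := by
  by_cases h : d.contains c = true
  · simp [h]
  · simp only [Bool.not_eq_true] at h
    simp [h, PySem.Dict.getD_insert_self, PySem.Dict.insert_insert_self,
      PySem.Dict.getD_of_not_contains d 0 h]

-- Stability: the running minimum element is the FIRST element attaining the minimum key.
theorem pvArgmin_first {α : Type} (key : α → Int) :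
    ∀ (t : List α) (x : α),
      some (t.foldl (fun m y => if key y < key m then y else m) x)
        = (x :: t).find? (fun y => key y == (t.map key).foldl min (key x)) := by
  intro t
  induction t with
  | nil => intro x; simp
  | cons y t ih =>
    intro x
    simp only [List.foldl, List.map]
    by_cases h : key y < key x
    · have hxM : ¬ (key x == List.foldl min (key y) (List.map key t)) = true := by
        have hle := (PySem.List.foldl_min_le (List.map key t) (key y)).1
        simp only [beq_iff_eq]
        omega
      rw [min_eq_right (le_of_lt h), if_pos h, ih y]
      exact (List.find?_cons_of_neg
        (p := fun z => key z == List.foldl min (key y) (List.map key t))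
        (a := x) (l := y :: t) hxM).symm
    · have hxy : key x ≤ key y := le_of_not_gt h
      rw [min_eq_left hxy, if_neg h, ih x]
      by_cases hx : (key x == List.foldl min (key x) (List.map key t)) = true
      · exact (List.find?_cons_of_pos
            (p := fun z => key z == List.foldl min (key x) (List.map key t))
            (a := x) (l := t) hx).trans
          (List.find?_cons_of_pos
            (p := fun z => key z == List.foldl min (key x) (List.map key t))
            (a := x) (l := y :: t) hx).symm
      · have hle := (PySem.List.foldl_min_le (List.map key t) (key x)).1
        have hyM : ¬ (key y == List.foldl min (key x) (List.map key t)) = true := by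
          simp only [beq_iff_eq] at hx ⊢
          omega
        exact (List.find?_cons_of_neg
            (p := fun z => key z == List.foldl min (key x) (List.map key t))
            (a := x) (l := t) hx).trans
          ((List.find?_cons_of_neg
            (p := fun z => key z == List.foldl min (key x) (List.map key t))
            (a := y) (l := t) hyM).symm.trans
           (List.find?_cons_of_neg
            (p := fun z => key z == List.foldl min (key x) (List.map key t))
            (a := x) (l := y :: t) hx).symm)

-- When the secondary key strictly increases along the list, a lexicographic
-- argmin never replaces on a primary tie, so min2? IS the running argmin by k1.
theorem pvMin2?_cons_eq {α : Type} (k1 k2 : α → Int) :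
    ∀ (t : List α) (x : α),
      (x :: t).Pairwise (fun a b => k2 a < k2 b) →
      PySem.List.min2? (x :: t) k1 k2
        = some (t.foldl (fun m y => if k1 y < k1 m then y else m) x) := by
  have aux : ∀ (t : List α) (x : α),
      (x :: t).Pairwise (fun a b => k2 a < k2 b) →
      t.foldl (fun acc y =>
          match acc with
          | none => some y
          | some m => if (decide (k1 y < k1 m) || !decide (k1 m < k1 y) && decide (k2 y < k2 m)) = true
              then some y else some m)
        (some x)
        = some (t.foldl (fun m y => if k1 y < k1 m then y else m) x) := by
    intro t
    induction t with
    | nil => intro x _; rfl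
    | cons y t ih =>
      intro x hp
      rcases List.pairwise_cons.mp hp with ⟨hx, hp'⟩
      have hxy : k2 x < k2 y := hx y List.mem_cons_self
      have hk2 : ¬ (k2 y < k2 x) := by omega
      simp only [List.foldl]
      by_cases h : k1 y < k1 x
      · rw [if_pos (by simp [h]), if_pos h]
        exact ih y hp'
      · rw [if_neg (by simp [h, hk2]), if_neg h]
        refine ih x (List.pairwise_cons.mpr ⟨?_, (List.pairwise_cons.mp hp').2⟩)
        intro b hb
        exact hx b (List.mem_cons_of_mem y hb)
  intro t x hp
  show List.foldl _ none (x :: t) = _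
  simp only [List.foldl]
  exact aux t x hp

-- Along set(xs) (= first occurrences in order) the first-position key strictly increases.
theorem pvIdx_pairwise (xs : List String) :
    (PySem.Set.ofList xs).Pairwise
      (fun a b => (((PySem.List.index? xs a).getD 0 : Nat) : Int)
                < (((PySem.List.index? xs b).getD 0 : Nat) : Int)) := by
  induction xs using List.reverseRecOn with
  | nil => simp [PySem.Set.ofList_nil]
  | append_singleton l c ih =>
    have hidx : ∀ a ∈ PySem.Set.ofList l,
        PySem.List.index? (l ++ [c]) a = PySem.List.index? l a := by
      intro a ha
      exact PySem.List.index?_append_of_mem [c] ((PySem.Set.mem_ofList l a).mp ha)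
    by_cases hc : c ∈ l
    · rw [PySem.Set.ofList_append_singleton,
        PySem.Set.add_of_mem ((PySem.Set.mem_ofList l c).mpr hc)]
      refine ih.imp_of_mem ?_
      intro a b ha hb hab
      rwa [hidx a ha, hidx b hb]
    · rw [PySem.Set.ofList_append_singleton,
        PySem.Set.add_of_not_mem (fun h => hc ((PySem.Set.mem_ofList l c).mp h))]
      refine List.pairwise_append.mpr ⟨?_, List.pairwise_singleton _ _, ?_⟩
      · refine ih.imp_of_mem ?_
        intro a b ha hb hab
        rwa [hidx a ha, hidx b hb]
      · intro a ha b hb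
        rw [List.mem_singleton] at hb
        rw [hidx a ha, hb, PySem.List.index?_append_singleton_self l c hc]
        have hmem : a ∈ l := (PySem.Set.mem_ofList l a).mp ha
        obtain ⟨k, hk⟩ := Option.isSome_iff_exists.mp
          ((PySem.List.index?_isSome_iff l a).mpr hmem)
        obtain ⟨hlt, -, -⟩ := PySem.List.getElem_of_index?_eq_some hk
        rw [hk]
        simpa using hlt

theorem pvMain (list_data : List String)
    (hne : Pre_get_lowest_occurance_char_in_list list_data) :
    get_lowest_occurance_char_in_list list_data
      = get_lowest_occurance_char_in_list_alt list_data := by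
  -- the counting key
  set cnt : String → Int := fun c => (list_data.count c : Int)
  -- A's dict is Counter(list_data)
  have hfold : list_data.foldl
      (fun d c =>
        let d' := if d.contains c then d else d.insert c (0 : Int)
        d'.insert c (d'.getD c 0 + 1)) PySem.Dict.empty
      = PySem.Dict.counter list_data := by
    rw [show (fun (d : PySem.Dict String Int) (c : String) =>
        let d' := if d.contains c then d else d.insert c (0 : Int)
        d'.insert c (d'.getD c 0 + 1))
        = (fun d c => d.insert c (d.getD c 0 + 1)) from funext fun d => funext fun c => pvStepA_eq d c]
    exact PySem.Dict.foldl_insert_getD_add_one_eq_counter list_data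
  -- the distinct elements, in first-occurrence order
  obtain ⟨c0, rest, hld⟩ : ∃ c0 rest, list_data = c0 :: rest := by
    cases list_data with
    | nil => exact absurd rfl hne
    | cons a l => exact ⟨a, l, rfl⟩
  have hDne : PySem.Set.ofList list_data ≠ [] := by
    intro h
    have hc : c0 ∈ PySem.Set.ofList list_data :=
      (PySem.Set.mem_ofList list_data c0).mpr (by rw [hld]; exact List.mem_cons_self)
    rw [h] at hc
    simp at hc
  obtain ⟨x, t, hD⟩ : ∃ x t, PySem.Set.ofList list_data = x :: t := by
    cases hDD : PySem.Set.ofList list_data with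
    | nil => exact absurd hDD hDne
    | cons a l => exact ⟨a, l, rfl⟩
  -- compute A
  have hitems : (PySem.Dict.counter list_data).items
      = (x :: t).map (fun k => (k, cnt k)) := by
    rw [PySem.Dict.items_counter, hD]
  have hvalues : (PySem.Dict.counter list_data).values
      = cnt x :: t.map cnt := by
    show (PySem.Dict.counter list_data).items.map (·.2) = _
    rw [hitems]; simp
  have hA : get_lowest_occurance_char_in_list list_data
      = (match ((PySem.Dict.counter list_data).items).find?
            (fun p => p.2 == (PySem.List.min? (PySem.Dict.counter list_data).values
              (fun v => v)).getD 0) with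
         | some p => p.1
         | none => "") := by
    unfold get_lowest_occurance_char_in_list
    rw [hfold]
  rw [hA, hvalues, hitems, PySem.List.min?_id_cons]
  simp only [Option.getD_some]
  rw [List.find?_map]
  have hpred : ((fun p : String × Int => p.2 == List.foldl min (cnt x) (List.map cnt t))
      ∘ (fun k => (k, cnt k))) = fun y => cnt y == (t.map cnt).foldl min (cnt x) := rfl
  rw [hpred, ← pvArgmin_first cnt t x]
  -- compute B: lexicographic min over the first-occurrence list IS the running argmin
  have hpw := pvIdx_pairwise list_data
  rw [hD] at hpw
  unfold get_lowest_occurance_char_in_list_alt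
  rw [hD, pvMin2?_cons_eq cnt (fun c => ((PySem.List.index? list_data c).getD 0 : Int)) t x hpw]
  rfl

-- ===== VERDICT (by name: the statement is the Claim_ definition above) =====
theorem get_lowest_occurance_char_in_list_spec : Claim_equal_get_lowest_occurance_char_in_list := by
  intro list_data _ hpre
  exact pvMain list_data hpre
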